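-- pv_equiv track=rewrite | github.com/CallMeChewy/Finder | Finder.py | _normalize_operators
-- ===== SOURCE A (Python) =====
-- def _normalize_operators(formula):
--     """Convert common logical operators to standard form"""
--     # Create a mapping of common operators to standard forms
--     operator_map = {
--         '&': ' AND ',
--         '&&': ' AND ',
--         '|': ' OR ',
--         '||': ' OR ',
--         '!': ' NOT ',
--         '~': ' NOT ',
--         '^': ' XOR '
--     }
--
--     # Apply replacements
--     normalized = formula
--     for symbol, replacement in operator_map.items():
--         normalized = normalized.replace(symbol, replacement)
--
--     return normalized
-- ===== SOURCE B (Python) =====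
-- def _normalize_operators(formula):
--     """Convert common logical operators to standard form"""
--     table = {ord('&'): ' AND ', ord('|'): ' OR ',
--              ord('!'): ' NOT ', ord('~'): ' NOT ', ord('^'): ' XOR '}
--     return formula.translate(table)
-- ===== Notes on version B (the rewrite author's own statement) =====
-- stated objective: idiomatic
-- what changed: Replaces seven sequential str.replace scans by one str.translate pass over a per-character table; the two-character dict entries in A can never match because their character was already replaced by an earlier single-character rule, so a single-character translation is exactly equivalent.
import Mathlib
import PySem

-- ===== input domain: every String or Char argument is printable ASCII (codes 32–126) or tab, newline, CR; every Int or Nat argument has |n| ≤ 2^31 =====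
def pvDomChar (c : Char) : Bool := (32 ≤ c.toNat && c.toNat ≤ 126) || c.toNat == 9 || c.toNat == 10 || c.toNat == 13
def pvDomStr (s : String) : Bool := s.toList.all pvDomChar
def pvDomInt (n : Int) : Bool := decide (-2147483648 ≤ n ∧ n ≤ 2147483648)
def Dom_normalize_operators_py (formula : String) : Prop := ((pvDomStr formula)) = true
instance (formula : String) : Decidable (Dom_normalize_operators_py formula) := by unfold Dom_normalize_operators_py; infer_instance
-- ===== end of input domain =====

-- B replaces A's seven sequential .replace scans with one per-character translation pass
-- (str.translate); equivalent because A's '&&'/'||' rules can never fire after '&'/'|' are gone.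

-- ===== PORT A =====
-- A iterates the dict's items in insertion order, applying str.replace each time.
def normalize_operators_py (formula : String) : String :=
  let operator_map : List (String × String) :=
    [("&", " AND "), ("&&", " AND "), ("|", " OR "), ("||", " OR "),
     ("!", " NOT "), ("~", " NOT "), ("^", " XOR ")]
  operator_map.foldl (fun normalized p => PySem.Str.replace normalized p.1 p.2) formula

-- ===== PORT B =====
-- B's translation table: each operator character maps to its word form, others pass through.
def pvTr (c : Char) : List Char :=
  if c = '&' then " AND ".toList
  else if c = '|' then " OR ".toList
  else if c = '!' then " NOT ".toList
  else if c = '~' then " NOT ".toList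
  else if c = '^' then " XOR ".toList
  else [c]

-- port of formula.translate(table): one pass, each char expanded independently
def normalize_operators_py_alt (formula : String) : String :=
  String.ofList (formula.toList.flatMap pvTr)

-- ===== PRECONDITION & SPEC =====
def Spec_normalize_operators_py (formula : String) (out : String) : Prop := out = normalize_operators_py_alt formula
instance (formula : String) (out : String) : Decidable (Spec_normalize_operators_py formula out) := by unfold Spec_normalize_operators_py; infer_instance

-- ===== CLAIM (what is proved, stated in full; the proofs are below) =====
def Claim_equal_normalize_operators_py : Prop := ∀ (formula : String), Dom_normalize_operators_py formula → Spec_normalize_operators_py formula (normalize_operators_py formula)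

-- ===== LEMMAS AND PROOFS =====

-- pointwise single-character substitution
def pvSub (c : Char) (r : List Char) : Char → List Char := fun x => if x = c then r else [x]

-- replace.go copies the input unchanged when the pattern's first char never occurs
theorem pvGo_no_match (c : Char) (rest new : List Char) :
    ∀ (fuel : Nat) (l acc : List Char), c ∉ l →
      PySem.Chars.replace.go (c :: rest) new fuel l acc = acc.reverse ++ l := by
  intro fuel
  induction fuel with
  | zero => intro l acc _; rw [PySem.Chars.replace.go.eq_def]
  | succ n ih =>
    intro l acc h
    cases l with
    | nil => rw [PySem.Chars.replace.go.eq_def]; simp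
    | cons x t =>
      rw [PySem.Chars.replace.go.eq_def]
      have hx : x ≠ c := fun hxc => h (hxc ▸ List.mem_cons_self)
      have : (c :: rest).isPrefixOf (x :: t) = false := by
        simp [List.isPrefixOf]
        intro hcx; exact absurd hcx.symm hx
      simp only [this, Bool.false_eq_true, if_false]
      rw [ih t (x :: acc) (fun ht => h (List.mem_cons_of_mem _ ht))]
      simp

-- replace.go for a single-char pattern is the pointwise substitution (given enough fuel)
theorem pvGo_single (c : Char) (new : List Char) :
    ∀ (l : List Char) (fuel : Nat) (acc : List Char), l.length ≤ fuel →
      PySem.Chars.replace.go [c] new fuel l acc = acc.reverse ++ l.flatMap (pvSub c new) := by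
  intro l
  induction l with
  | nil => intro fuel acc _; cases fuel <;> rw [PySem.Chars.replace.go.eq_def] <;> simp
  | cons x t ih =>
    intro fuel acc hf
    cases fuel with
    | zero => simp at hf
    | succ n =>
      rw [PySem.Chars.replace.go.eq_def]
      by_cases hx : x = c
      · subst hx
        have : ([x].isPrefixOf (x :: t)) = true := by simp [List.isPrefixOf]
        simp only [this, if_true, List.length_cons, List.drop_succ_cons, List.length_nil, List.drop_zero]
        rw [ih n (new.reverse ++ acc) (Nat.le_of_succ_le_succ hf)]
        simp [pvSub]
      · have : ([c].isPrefixOf (x :: t)) = false := by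
          simp [List.isPrefixOf]; intro hcx; exact absurd hcx.symm hx
        simp only [this, Bool.false_eq_true, if_false]
        rw [ih n (x :: acc) (Nat.le_of_succ_le_succ hf)]
        simp [pvSub, hx]

theorem pvReplace_single (s : List Char) (c : Char) (new : List Char) :
    PySem.Chars.replace s [c] new = s.flatMap (pvSub c new) := by
  rw [PySem.Chars.replace]
  simp only [List.isEmpty_cons, Bool.false_eq_true, if_false]
  exact pvGo_single c new s s.length [] (le_refl _)

theorem pvReplace_no_match (s : List Char) (c : Char) (rest new : List Char) (h : c ∉ s) :
    PySem.Chars.replace s (c :: rest) new = s := by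
  rw [PySem.Chars.replace]
  simp only [List.isEmpty_cons, Bool.false_eq_true, if_false]
  rw [pvGo_no_match c rest new s.length s [] h]
  simp

-- after substituting c away, c no longer occurs (given c ∉ its replacement)
theorem pvNot_mem_flatMap_sub (s : List Char) (c : Char) (new : List Char) (h : c ∉ new) :
    c ∉ s.flatMap (pvSub c new) := by
  intro hm
  rcases List.mem_flatMap.mp hm with ⟨x, _, hx⟩
  unfold pvSub at hx
  by_cases hxc : x = c
  · simp [hxc] at hx; exact h hx
  · simp [hxc] at hx; exact hxc (hx ▸ rfl)

-- the five single-char substitutions, composed in A's order, equal B's table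
theorem pvCompose (x : Char) :
    (pvSub '&' " AND ".toList x).flatMap (fun y =>
      (pvSub '|' " OR ".toList y).flatMap (fun z =>
        (pvSub '!' " NOT ".toList z).flatMap (fun w =>
          (pvSub '~' " NOT ".toList w).flatMap (pvSub '^' " XOR ".toList)))) = pvTr x := by
  by_cases h1 : x = '&'
  · subst h1; decide
  · by_cases h2 : x = '|'
    · subst h2; decide
    · by_cases h3 : x = '!'
      · subst h3; decide
      · by_cases h4 : x = '~'
        · subst h4; decide
        · by_cases h5 : x = '^'
          · subst h5; decide
          · simp [pvSub, pvTr, h1, h2, h3, h4, h5]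

-- ===== VERDICT (by name: the statement is the Claim_ definition above) =====
theorem normalize_operators_py_spec : Claim_equal_normalize_operators_py := by
  intro formula _
  unfold Spec_normalize_operators_py normalize_operators_py normalize_operators_py_alt
  simp only [List.foldl]
  rw [← String.toList_inj]
  simp only [PySem.Str.toList_replace]
  set s := formula.toList with hs
  have e1 : PySem.Chars.replace s "&".toList " AND ".toList = s.flatMap (pvSub '&' " AND ".toList) :=
    pvReplace_single s '&' _
  rw [e1]
  have e2 : PySem.Chars.replace (s.flatMap (pvSub '&' " AND ".toList)) "&&".toList " AND ".toList
      = s.flatMap (pvSub '&' " AND ".toList) :=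
    pvReplace_no_match _ '&' ['&'] _ (pvNot_mem_flatMap_sub s '&' _ (by decide))
  rw [e2]
  have e3 : PySem.Chars.replace (s.flatMap (pvSub '&' " AND ".toList)) "|".toList " OR ".toList
      = (s.flatMap (pvSub '&' " AND ".toList)).flatMap (pvSub '|' " OR ".toList) :=
    pvReplace_single _ '|' _
  rw [e3]
  set s2 := (s.flatMap (pvSub '&' " AND ".toList)).flatMap (pvSub '|' " OR ".toList) with hs2
  have e4 : PySem.Chars.replace s2 "||".toList " OR ".toList = s2 :=
    pvReplace_no_match _ '|' ['|'] _ (pvNot_mem_flatMap_sub _ '|' _ (by decide))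
  rw [e4]
  have e5 : PySem.Chars.replace s2 "!".toList " NOT ".toList = s2.flatMap (pvSub '!' " NOT ".toList) :=
    pvReplace_single _ '!' _
  rw [e5]
  have e6 : PySem.Chars.replace (s2.flatMap (pvSub '!' " NOT ".toList)) "~".toList " NOT ".toList
      = (s2.flatMap (pvSub '!' " NOT ".toList)).flatMap (pvSub '~' " NOT ".toList) :=
    pvReplace_single _ '~' _
  rw [e6]
  have e7 : PySem.Chars.replace ((s2.flatMap (pvSub '!' " NOT ".toList)).flatMap (pvSub '~' " NOT ".toList)) "^".toList " XOR ".toList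
      = (((s2.flatMap (pvSub '!' " NOT ".toList)).flatMap (pvSub '~' " NOT ".toList))).flatMap (pvSub '^' " XOR ".toList) :=
    pvReplace_single _ '^' _
  rw [e7, hs2]
  simp only [List.flatMap_assoc]
  simp only [String.toList_ofList]
  exact List.flatMap_congr (fun x _ => pvCompose x)
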